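-- pv_equiv track=rewrite | github.com/Therealchainman/TicTacToe | tictactoe.py | check_hor
-- ===== SOURCE A (Python) =====
-- def check_hor(i, j, board, visited):
-- 	piece = board[i][j]
-- 	queue = [(i, j)]
-- 	while queue:
-- 		i, j = queue.pop()
-- 		if board[i][j] != piece:
-- 			return False
-- 		visited[i][j] = True
-- 		if j > 0 and not visited[i][j - 1]:
-- 			queue.append((i, j - 1))
-- 		if j < 2 and not visited[i][j + 1]:
-- 			queue.append((i, j + 1))
-- 	return True
-- ===== SOURCE B (Python) =====
-- def check_hor(i, j, board, visited):
-- 	piece = board[i][j]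
-- 	visited[i][j] = True
-- 	for k in range(j + 1, 3):
-- 		if visited[i][k]:
-- 			break
-- 		if board[i][k] != piece:
-- 			return False
-- 		visited[i][k] = True
-- 	for k in range(j - 1, -1, -1):
-- 		if visited[i][k]:
-- 			break
-- 		if board[i][k] != piece:
-- 			return False
-- 		visited[i][k] = True
-- 	return True
-- ===== Notes on version B (the rewrite author's own statement) =====
-- stated objective: alternative
-- what changed: Replaces A's explicit stack/worklist DFS over the row (with visited-based cycle avoidance) by two direct index scans, right from j+1 to 2 and then left from j-1 down to 0, stopping at already-visited cells; no queue is ever built.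
-- outside the precondition, e.g. on check_hor(0, 0, [['X', 'X']], [[False, True]]): A returns True, B returns True
import Mathlib
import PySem

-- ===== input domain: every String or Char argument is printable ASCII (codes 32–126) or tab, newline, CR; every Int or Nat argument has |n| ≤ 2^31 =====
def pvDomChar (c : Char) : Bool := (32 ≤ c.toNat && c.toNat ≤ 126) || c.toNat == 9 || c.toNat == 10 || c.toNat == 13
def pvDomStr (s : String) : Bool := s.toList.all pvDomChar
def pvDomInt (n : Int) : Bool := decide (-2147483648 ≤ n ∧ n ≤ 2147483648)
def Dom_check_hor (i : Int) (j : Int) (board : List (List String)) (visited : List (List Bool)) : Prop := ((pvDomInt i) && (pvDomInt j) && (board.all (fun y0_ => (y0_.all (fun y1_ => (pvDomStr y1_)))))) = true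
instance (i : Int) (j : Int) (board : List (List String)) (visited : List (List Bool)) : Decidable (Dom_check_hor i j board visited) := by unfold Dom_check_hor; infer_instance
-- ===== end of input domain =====

-- B replaces A's stack/worklist DFS over the row by two direct index scans (right from j+1 to 2,
-- then left from j-1 down to 0), an 'alternative' decomposition of equal cost; both mutate
-- `visited` in Python identically on Pre_, and the theorem is about the return value.

-- ===== PORT A =====
-- board[i][k] read on a 2D list (default only reachable where Python would raise IndexError, outside Pre_)
def pvGet2D {α : Type} (m : List (List α)) (i k : Int) (d : α) : α :=
  PySem.List.pyGetD (PySem.List.pyGetD m i []) k d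

-- visited[i][k] = x on a 2D list (total form; exact where the indices are in range, i.e. on Pre_)
def pvSet2 {α : Type} (m : List (List α)) (i k : Int) (x : α) : List (List α) :=
  PySem.List.pySetD m i (PySem.List.pySetD (PySem.List.pyGetD m i []) k x)

-- the 'while queue:' loop of A; the fuel only makes it total: on Pre_ the loop pops at most |j|+4 times
def checkHorLoopA (board : List (List String)) (piece : String) :
    Nat → List (Int × Int) → List (List Bool) → Bool
  | 0, _, _ => false
  | fuel + 1, q, vis =>
    match PySem.List.pop? q with
    | none => true                                    -- queue empty: return True
    | some ((i, j), q') =>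
      if pvGet2D board i j "" ≠ piece then false      -- board[i][j] != piece: return False
      else
        let vis' := pvSet2 vis i j true               -- visited[i][j] = True
        let q1 := if decide (0 < j) && !(pvGet2D vis' i (j - 1) false)
                  then q' ++ [(i, j - 1)] else q'     -- append (i, j-1)
        let q2 := if decide (j < 2) && !(pvGet2D vis' i (j + 1) false)
                  then q1 ++ [(i, j + 1)] else q1     -- append (i, j+1)
        checkHorLoopA board piece fuel q2 vis'

def check_hor (i : Int) (j : Int) (board : List (List String)) (visited : List (List Bool)) : Bool :=
  let piece := pvGet2D board i j ""
  checkHorLoopA board piece (j.natAbs + 16) [(i, j)] visited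

-- ===== PORT B =====
-- one 'for k in ks: if visited[i][k]: break / if board[i][k] != piece: return False / mark' scan
def scanRowB (board : List (List String)) (piece : String) (i : Int) :
    List Int → List (List Bool) → Bool × List (List Bool)
  | [], vis => (true, vis)
  | k :: ks, vis =>
    if pvGet2D vis i k false then (true, vis)         -- break
    else if pvGet2D board i k "" ≠ piece then (false, vis)  -- return False
    else scanRowB board piece i ks (pvSet2 vis i k true)

def check_hor_alt (i : Int) (j : Int) (board : List (List String)) (visited : List (List Bool)) : Bool :=
  let piece := pvGet2D board i j ""
  let vis0 := pvSet2 visited i j true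
  let r := scanRowB board piece i (PySem.List.pyRange (j + 1) 3 1) vis0
  if r.1 then (scanRowB board piece i (PySem.List.pyRange (j - 1) (-1) (-1)) r.2).1 else false

-- ===== PRECONDITION & SPEC =====
-- Pre_ is the natural domain of the row check: a row index i valid for both 2D lists (Python's
-- wraparound for negative indices included) and a column j whose whole traversal stays in range
-- of row i of board and visited: for 0 ≤ j the rows must be longer than max(j,2), for negative j
-- (wraparound) at least 3 wide and long enough for j itself. Outside it A almost always raises
-- IndexError; it also excludes configurations (e.g. a too-short row shielded by pre-visited
-- cells) where A happens to return a value only by accident of its traversal — see claim cites.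
def Pre_check_hor (i : Int) (j : Int) (board : List (List String)) (visited : List (List Bool)) : Prop :=
  PySem.Raise.InRange board.length i ∧ PySem.Raise.InRange visited.length i ∧
  ((0 ≤ j ∧ max j 2 < ((PySem.List.pyGetD board i []).length : Int) ∧
      max j 2 < ((PySem.List.pyGetD visited i []).length : Int)) ∨
    (j < 0 ∧ -((PySem.List.pyGetD board i []).length : Int) ≤ j ∧
      -((PySem.List.pyGetD visited i []).length : Int) ≤ j ∧
      3 ≤ (PySem.List.pyGetD board i []).length ∧ 3 ≤ (PySem.List.pyGetD visited i []).length))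
instance (i : Int) (j : Int) (board : List (List String)) (visited : List (List Bool)) : Decidable (Pre_check_hor i j board visited) := by unfold Pre_check_hor PySem.Raise.InRange; infer_instance

def pvWitness_check_hor : Int × Int × List (List String) × List (List Bool) :=
  (0, 1, [["X", "O", "X"]], [[false, false, false]])

def Spec_check_hor (i : Int) (j : Int) (board : List (List String)) (visited : List (List Bool)) (out : Bool) : Prop := out = check_hor_alt i j board visited
instance (i : Int) (j : Int) (board : List (List String)) (visited : List (List Bool)) (out : Bool) : Decidable (Spec_check_hor i j board visited out) := by unfold Spec_check_hor; infer_instance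

-- ===== CLAIM (what is proved, stated in full; the proofs are below) =====
def Claim_equal_check_hor : Prop := ∀ (i : Int) (j : Int) (board : List (List String)) (visited : List (List Bool)), Dom_check_hor i j board visited → Pre_check_hor i j board visited → Spec_check_hor i j board visited (check_hor i j board visited)

-- ===== LEMMAS AND PROOFS =====

-- Row-level images of the two programs (used only by the proofs): both ports touch only row i,
-- so they are simulated by the same machines running on that single row.
def rowLoopA (b : List String) (piece : String) : Nat → List Int → List Bool → Bool
  | 0, _, _ => false
  | fuel + 1, q, v =>
    match PySem.List.pop? q with
    | none => true
    | some (j, q') =>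
      if PySem.List.pyGetD b j "" ≠ piece then false
      else
        let v' := PySem.List.pySetD v j true
        let q1 := if decide (0 < j) && !(PySem.List.pyGetD v' (j - 1) false) then q' ++ [j - 1] else q'
        let q2 := if decide (j < 2) && !(PySem.List.pyGetD v' (j + 1) false) then q1 ++ [j + 1] else q1
        rowLoopA b piece fuel q2 v'

def rowScanB (b : List String) (piece : String) : List Int → List Bool → Bool × List Bool
  | [], v => (true, v)
  | k :: ks, v =>
    if PySem.List.pyGetD v k false then (true, v)
    else if PySem.List.pyGetD b k "" ≠ piece then (false, v)
    else rowScanB b piece ks (PySem.List.pySetD v k true)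

lemma length_pvSet2 {α : Type} (m : List (List α)) (i k : Int) (x : α) :
    (pvSet2 m i k x).length = m.length := by
  simp [pvSet2, PySem.List.length_pySetD]

lemma pyIdx_some (len : Nat) (i : Int) (h : PySem.Raise.InRange len i) :
    ∃ n, PySem.List.pyIdx? len i = some n ∧ n < len := by
  obtain ⟨h1, h2⟩ := h
  unfold PySem.List.pyIdx?
  by_cases h0 : 0 ≤ i
  · rw [if_pos h0, if_pos (by omega)]
    exact ⟨i.toNat, rfl, by omega⟩
  · rw [if_neg h0, if_pos (by omega)]
    exact ⟨len - (-i).toNat, rfl, by omega⟩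

lemma row_pvSet2 {α : Type} (m : List (List α)) (i k : Int) (x : α)
    (h : PySem.Raise.InRange m.length i) :
    PySem.List.pyGetD (pvSet2 m i k x) i [] =
      PySem.List.pySetD (PySem.List.pyGetD m i []) k x := by
  obtain ⟨n, hn, hlt⟩ := pyIdx_some m.length i h
  have hset : pvSet2 m i k x =
      m.set n (PySem.List.pySetD (PySem.List.pyGetD m i []) k x) := by
    simp [pvSet2, PySem.List.pySetD, PySem.List.pySet?, hn]
  rw [hset]
  simp [PySem.List.pyGetD, PySem.List.pyGet?, hn, hlt]

-- Int-index form of PySem.List.pyGetD_pySetD_natCast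
lemma pyGetD_pySetD_int (v : List Bool) (a c : Int) (x d : Bool)
    (ha0 : 0 ≤ a) (ha : a < (v.length : Int)) (hc0 : 0 ≤ c) :
    PySem.List.pyGetD (PySem.List.pySetD v a x) c d =
      if c = a then x else PySem.List.pyGetD v c d := by
  have h := PySem.List.pyGetD_pySetD_natCast v a.toNat c.toNat x d (by omega)
  rw [Int.toNat_of_nonneg ha0, Int.toNat_of_nonneg hc0] at h
  rw [h]
  by_cases hc : c = a
  · simp [hc]
  · have : ¬ (c.toNat = a.toNat) := by omega
    simp_all

lemma simA (board : List (List String)) (piece : String) (i : Int) :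
    ∀ (fuel : Nat) (q : List Int) (m : List (List Bool)), PySem.Raise.InRange m.length i →
      checkHorLoopA board piece fuel (q.map (fun j => (i, j))) m =
        rowLoopA (PySem.List.pyGetD board i []) piece fuel q (PySem.List.pyGetD m i []) := by
  intro fuel
  induction fuel with
  | zero => intro q m _; rfl
  | succ n ih =>
    intro q m hin
    rcases List.eq_nil_or_concat q with rfl | ⟨qs, a, rfl⟩
    · rfl
    · rw [List.concat_eq_append, checkHorLoopA, rowLoopA, List.map_append, List.map_cons,
        List.map_nil, PySem.List.pop?_last, PySem.List.pop?_last]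
      simp only [pvGet2D]
      by_cases hb : PySem.List.pyGetD (PySem.List.pyGetD board i []) a "" ≠ piece
      · rw [if_pos hb, if_pos hb]
      · rw [if_neg hb, if_neg hb]
        have hlen : PySem.Raise.InRange (pvSet2 m i a true).length i := by
          rw [length_pvSet2]; exact hin
        simp only [row_pvSet2 m i a true hin]
        split_ifs <;>
          first
            | simpa [row_pvSet2 m i a true hin] using ih ((qs ++ [a - 1]) ++ [a + 1]) _ hlen
            | simpa [row_pvSet2 m i a true hin] using ih (qs ++ [a - 1]) _ hlen
            | simpa [row_pvSet2 m i a true hin] using ih (qs ++ [a + 1]) _ hlen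
            | simpa [row_pvSet2 m i a true hin] using ih qs _ hlen

lemma simB (board : List (List String)) (piece : String) (i : Int) :
    ∀ (ks : List Int) (m : List (List Bool)), PySem.Raise.InRange m.length i →
      (scanRowB board piece i ks m).1 =
          (rowScanB (PySem.List.pyGetD board i []) piece ks (PySem.List.pyGetD m i [])).1 ∧
        PySem.List.pyGetD (scanRowB board piece i ks m).2 i [] =
          (rowScanB (PySem.List.pyGetD board i []) piece ks (PySem.List.pyGetD m i [])).2 ∧
        (scanRowB board piece i ks m).2.length = m.length := by
  intro ks
  induction ks with
  | nil => intro m _; exact ⟨rfl, rfl, rfl⟩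
  | cons k ks ih =>
    intro m hin
    rw [scanRowB, rowScanB]
    by_cases hv : PySem.List.pyGetD (PySem.List.pyGetD m i []) k false
    · simp [pvGet2D, hv]
    · by_cases hb : PySem.List.pyGetD (PySem.List.pyGetD board i []) k "" ≠ piece
      · simp [pvGet2D, hv, hb]
      · have hlen : PySem.Raise.InRange (pvSet2 m i k true).length i := by
          rw [length_pvSet2]; exact hin
        have := ih (pvSet2 m i k true) hlen
        rw [row_pvSet2 m i k true hin] at this
        simp only [pvGet2D, hv, hb, if_neg, Bool.false_eq_true, not_false_eq_true]
        simpa [length_pvSet2] using this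

lemma get_set_self (v : List Bool) (a : Int) (x d : Bool)
    (ha : PySem.Raise.InRange v.length a) :
    PySem.List.pyGetD (PySem.List.pySetD v a x) a d = x := by
  obtain ⟨n, hn, hlt⟩ := pyIdx_some v.length a ha
  have hs : PySem.List.pySetD v a x = v.set n x := by
    simp [PySem.List.pySetD, PySem.List.pySet?, hn]
  simp [hs, PySem.List.pyGetD, PySem.List.pyGet?, hn, hlt]

lemma get_set_ne (v : List Bool) (a c : Int) (x d : Bool)
    (ha : PySem.Raise.InRange v.length a)
    (hne : PySem.List.pyIdx? v.length c ≠ PySem.List.pyIdx? v.length a) :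
    PySem.List.pyGetD (PySem.List.pySetD v a x) c d = PySem.List.pyGetD v c d := by
  obtain ⟨n, hn, hlt⟩ := pyIdx_some v.length a ha
  have hs : PySem.List.pySetD v a x = v.set n x := by
    simp [PySem.List.pySetD, PySem.List.pySet?, hn]
  rw [hn] at hne
  simp only [hs, PySem.List.pyGetD, PySem.List.pyGet?, List.length_set]
  cases hc : PySem.List.pyIdx? v.length c with
  | none => rfl
  | some m =>
    have hmn : n ≠ m := by rw [hc] at hne; rintro rfl; exact hne rfl
    simp [List.getElem?_set_ne hmn]

-- adjacent columns never collide under Python index wraparound in a row of length ≥ 3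
lemma idx_ne_adj (len : Nat) (a c : Int) (h3 : 3 ≤ len)
    (ha : PySem.Raise.InRange len a) (hc : PySem.Raise.InRange len c)
    (hd : a = c + 1 ∨ c = a + 1) :
    PySem.List.pyIdx? len c ≠ PySem.List.pyIdx? len a := by
  obtain ⟨ha1, ha2⟩ := ha
  obtain ⟨hc1, hc2⟩ := hc
  unfold PySem.List.pyIdx?
  split_ifs <;> simp_all <;> omega

-- A's leftward descent from a singleton worklist equals B's left scan
lemma descend (b : List String) (piece : String) :
    ∀ (fuel : Nat) (k : Int) (v : List Bool), 0 ≤ k → k < (v.length : Int) →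
      k.toNat + 2 ≤ fuel → (k < 2 → PySem.List.pyGetD v (k + 1) false = true) →
      rowLoopA b piece fuel [k] v =
        (if PySem.List.pyGetD b k "" ≠ piece then false
         else (rowScanB b piece (PySem.List.pyRange (k - 1) (-1) (-1))
                (PySem.List.pySetD v k true)).1) := by
  intro fuel
  induction fuel with
  | zero => intro k v hk0 _ hf _; omega
  | succ n ih =>
    intro k v hk0 hkl hf hk2
    have hp : PySem.List.pop? [k] = some (k, ([] : List Int)) := by
      simpa using PySem.List.pop?_last [] k
    rw [rowLoopA, hp]
    by_cases hbk : PySem.List.pyGetD b k "" ≠ piece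
    · simp [hbk]
    · have hrt : (decide (k < 2) &&
          !(PySem.List.pyGetD (PySem.List.pySetD v k true) (k + 1) false)) = false := by
        by_cases h2 : k < 2
        · rw [pyGetD_pySetD_int v k (k + 1) true false hk0 hkl (by omega)]
          simp [show ¬(k + 1 = k) by omega, hk2 h2]
        · simp [h2]
      obtain ⟨m, rfl⟩ : ∃ m, n = m + 1 := ⟨n - 1, by omega⟩
      have hpnil : PySem.List.pop? ([] : List Int) = none := by decide
      simp only [hbk, if_false]
      rw [hrt]
      simp only [Bool.false_eq_true, if_false]
      rcases eq_or_lt_of_le hk0 with hzero | hpos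
      · -- k = 0: no left push, the loop drains and returns True; the left range is empty
        subst hzero
        simp [rowLoopA, hpnil, rowScanB]
      · have hcons : PySem.List.pyRange (k - 1) (-1) (-1) =
            (k - 1) :: PySem.List.pyRange (k - 1 - 1) (-1) (-1) :=
          PySem.List.pyRange_neg_one_cons (by omega)
        by_cases hvl : PySem.List.pyGetD (PySem.List.pySetD v k true) (k - 1) false = true
        · -- blocked: the queue drains; the left scan breaks at the pre-visited cell
          rw [show (decide (0 < k) &&
              !(PySem.List.pyGetD (PySem.List.pySetD v k true) (k - 1) false)) = false by
            simp [hvl]]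
          simp [rowLoopA, hpnil, hcons, rowScanB, hvl]
        · -- step left: induction hypothesis on k - 1
          have hih := ih (k - 1) (PySem.List.pySetD v k true) (by omega)
            (by rw [PySem.List.length_pySetD]; omega) (by omega)
            (by intro _
                rw [show k - 1 + 1 = k by omega,
                  pyGetD_pySetD_int v k k true false hk0 hkl hk0]
                simp)
          rw [show (decide (0 < k) &&
              !(PySem.List.pyGetD (PySem.List.pySetD v k true) (k - 1) false)) = true by
            simp [hpos, hvl]]
          simp only [if_true, List.nil_append]
          rw [hih, hcons, rowScanB]
          simp only [Bool.not_eq_true] at hvl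
          rw [hvl]
          by_cases hb2 : PySem.List.pyGetD b (k - 1) "" ≠ piece <;> simp [hb2]

-- A's rightward walk (wraparound start) equals B's right scan
lemma ascend (b : List String) (piece : String) :
    ∀ (fuel : Nat) (k : Int) (v : List Bool), -(v.length : Int) ≤ k → k ≤ 2 → 3 ≤ v.length →
      (3 - k).toNat + 1 ≤ fuel → (0 < k → PySem.List.pyGetD v (k - 1) false = true) →
      rowLoopA b piece fuel [k] v =
        (if PySem.List.pyGetD b k "" ≠ piece then false
         else (rowScanB b piece (PySem.List.pyRange (k + 1) 3 1)
                (PySem.List.pySetD v k true)).1) := by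
  intro fuel
  induction fuel with
  | zero => intro k v _ hk2 _ hf _; omega
  | succ n ih =>
    intro k v hkl hk2 h3 hf hl
    have hp : PySem.List.pop? [k] = some (k, ([] : List Int)) := by
      simpa using PySem.List.pop?_last [] k
    have hpnil : PySem.List.pop? ([] : List Int) = none := by decide
    rw [rowLoopA, hp]
    by_cases hbk : PySem.List.pyGetD b k "" ≠ piece
    · simp [hbk]
    · have hinr : PySem.Raise.InRange v.length k := ⟨hkl, by omega⟩
      have hlt : (decide (0 < k) &&
          !(PySem.List.pyGetD (PySem.List.pySetD v k true) (k - 1) false)) = false := by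
        by_cases hk0 : 0 < k
        · rw [get_set_ne v k (k - 1) true false hinr
            (idx_ne_adj v.length k (k - 1) h3 hinr ⟨by omega, by omega⟩ (by omega))]
          simp [hl hk0]
        · simp [hk0]
      simp only [hbk, if_false]
      rw [hlt]
      simp only [Bool.false_eq_true, if_false]
      rcases eq_or_lt_of_le hk2 with hk2e | hk2l
      · -- k = 2: neither neighbour is pushed; the right range is empty
        subst hk2e
        rw [show (decide ((2:Int) < 2) &&
            !(PySem.List.pyGetD (PySem.List.pySetD v 2 true) (2 + 1) false)) = false by simp]
        obtain ⟨m, rfl⟩ : ∃ m, n = m + 1 := ⟨n - 1, by omega⟩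
        simp [rowLoopA, hpnil, rowScanB]
      · have hconsR : PySem.List.pyRange (k + 1) 3 1 =
            (k + 1) :: PySem.List.pyRange (k + 1 + 1) 3 1 :=
          PySem.List.pyRange_one_cons (by omega)
        by_cases hvr : PySem.List.pyGetD (PySem.List.pySetD v k true) (k + 1) false = true
        · rw [show (decide (k < 2) &&
              !(PySem.List.pyGetD (PySem.List.pySetD v k true) (k + 1) false)) = false by
            simp [hvr]]
          obtain ⟨m, rfl⟩ : ∃ m, n = m + 1 := ⟨n - 1, by omega⟩
          simp [rowLoopA, hpnil, hconsR, rowScanB, hvr]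
        · rw [show (decide (k < 2) &&
              !(PySem.List.pyGetD (PySem.List.pySetD v k true) (k + 1) false)) = true by
            simp [hk2l, hvr]]
          simp only [if_true, List.nil_append]
          have hih := ih (k + 1) (PySem.List.pySetD v k true)
            (by rw [PySem.List.length_pySetD]; omega) (by omega)
            (by rw [PySem.List.length_pySetD]; omega) (by omega)
            (by intro _
                rw [show k + 1 - 1 = k by omega]
                exact get_set_self v k true false hinr)
          rw [hih, hconsR, rowScanB]
          simp only [Bool.not_eq_true] at hvr
          rw [hvr]
          by_cases hb2 : PySem.List.pyGetD b (k + 1) "" ≠ piece <;> simp [hb2]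

-- the negative-j case: Python wraparound start, only the rightward walk happens
lemma row_main_neg (b : List String) (v : List Bool) (j : Int)
    (hj : j < 0) (_hjb : -(b.length : Int) ≤ j) (hjv : -(v.length : Int) ≤ j)
    (_h3b : 3 ≤ b.length) (h3v : 3 ≤ v.length) :
    rowLoopA b (PySem.List.pyGetD b j "") (j.natAbs + 16) [j] v =
      (if (rowScanB b (PySem.List.pyGetD b j "") (PySem.List.pyRange (j + 1) 3 1)
              (PySem.List.pySetD v j true)).1
       then (rowScanB b (PySem.List.pyGetD b j "")
              (PySem.List.pyRange (j - 1) (-1) (-1))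
              (rowScanB b (PySem.List.pyGetD b j "") (PySem.List.pyRange (j + 1) 3 1)
                (PySem.List.pySetD v j true)).2).1
       else false) := by
  have hp : PySem.List.pop? [j] = some (j, ([] : List Int)) := by
    simpa using PySem.List.pop?_last [] j
  have hpnil : PySem.List.pop? ([] : List Int) = none := by decide
  have hln : PySem.List.pyRange (j - 1) (-1) (-1) = [] :=
    PySem.List.pyRange_neg_one_eq_nil (by omega)
  have hbk : ¬ (PySem.List.pyGetD b j "" ≠ PySem.List.pyGetD b j "") := by simp
  rw [show j.natAbs + 16 = (j.natAbs + 15) + 1 from rfl, rowLoopA, hp]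
  simp only [hbk, if_false]
  rw [show (decide (0 < j) &&
      !(PySem.List.pyGetD (PySem.List.pySetD v j true) (j - 1) false)) = false by
    simp [show ¬ (0:Int) < j by omega]]
  simp only [Bool.false_eq_true, if_false]
  have hconsR : PySem.List.pyRange (j + 1) 3 1 =
      (j + 1) :: PySem.List.pyRange (j + 1 + 1) 3 1 :=
    PySem.List.pyRange_one_cons (by omega)
  by_cases hvr : PySem.List.pyGetD (PySem.List.pySetD v j true) (j + 1) false = true
  · rw [show (decide (j < 2) &&
        !(PySem.List.pyGetD (PySem.List.pySetD v j true) (j + 1) false)) = false by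
      simp [hvr]]
    rw [show j.natAbs + 15 = (j.natAbs + 14) + 1 from rfl]
    simp [rowLoopA, hpnil, hconsR, rowScanB, hvr, hln]
  · rw [show (decide (j < 2) &&
        !(PySem.List.pyGetD (PySem.List.pySetD v j true) (j + 1) false)) = true by
      simp [show j < 2 by omega, hvr]]
    simp only [if_true, List.nil_append]
    have hih := ascend b (PySem.List.pyGetD b j "") (j.natAbs + 15) (j + 1)
      (PySem.List.pySetD v j true)
      (by rw [PySem.List.length_pySetD]; omega) (by omega)
      (by rw [PySem.List.length_pySetD]; omega) (by omega)
      (fun h => absurd h (by omega))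
    rw [hih, hconsR, rowScanB]
    simp only [Bool.not_eq_true] at hvr
    rw [hvr]
    by_cases hb2 : PySem.List.pyGetD b (j + 1) "" ≠ PySem.List.pyGetD b j "" <;>
      simp [hb2, hln, rowScanB]

set_option maxHeartbeats 1000000 in
lemma row_main_pos (b : List String) (v : List Bool) (j : Int)
    (hj0 : 0 ≤ j) (hb : max j 2 < (b.length : Int)) (hv : max j 2 < (v.length : Int)) :
    rowLoopA b (PySem.List.pyGetD b j "") (j.natAbs + 16) [j] v =
      (if (rowScanB b (PySem.List.pyGetD b j "") (PySem.List.pyRange (j + 1) 3 1)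
              (PySem.List.pySetD v j true)).1
       then (rowScanB b (PySem.List.pyGetD b j "")
              (PySem.List.pyRange (j - 1) (-1) (-1))
              (rowScanB b (PySem.List.pyGetD b j "") (PySem.List.pyRange (j + 1) 3 1)
                (PySem.List.pySetD v j true)).2).1
       else false) := by
  by_cases hj3 : j < 3
  · -- j ∈ {0, 1, 2}: both sides evaluate over the first three cells of the row
    obtain ⟨b0, b1, b2, bt, rfl⟩ : ∃ b0 b1 b2 bt, b = b0 :: b1 :: b2 :: bt := by
      have : 3 ≤ b.length := by omega
      match b, this with | x :: y :: z :: t, _ => exact ⟨x, y, z, t, rfl⟩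
    obtain ⟨v0, v1, v2, vt, rfl⟩ : ∃ v0 v1 v2 vt, v = v0 :: v1 :: v2 :: vt := by
      have : 3 ≤ v.length := by omega
      match v, this with | x :: y :: z :: t, _ => exact ⟨x, y, z, t, rfl⟩
    have hj : j = 0 ∨ j = 1 ∨ j = 2 := by omega
    have p0 : PySem.List.pop? ([] : List Int) = none := by decide
    have pa : PySem.List.pop? ([0] : List Int) = some (0, []) := by decide
    have pb : PySem.List.pop? ([1] : List Int) = some (1, []) := by decide
    have pc : PySem.List.pop? ([2] : List Int) = some (2, []) := by decide
    have pd : PySem.List.pop? ([0, 2] : List Int) = some (2, [0]) := by decide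
    have pe : PySem.List.pop? ([1, 0] : List Int) = some (0, [1]) := by decide
    have ra : PySem.List.pyRange 1 3 1 = [1, 2] := by decide
    have rb : PySem.List.pyRange 2 3 1 = [2] := by decide
    have rc : PySem.List.pyRange 3 3 1 = [] := by decide
    have rd : PySem.List.pyRange (-1) (-1) (-1) = [] := by decide
    have re : PySem.List.pyRange 0 (-1) (-1) = [0] := by decide
    have rf : PySem.List.pyRange 1 (-1) (-1) = [1, 0] := by decide
    rcases hj with rfl | rfl | rfl
    · by_cases hA : b1 = b0 <;> by_cases hB : b2 = b0 <;>
        cases v0 <;> cases v1 <;> cases v2 <;>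
          simp [rowLoopA, rowScanB, p0, pa, pb, pc, pd, pe, ra, rb, rc, rd, re, rf, hA, hB,
            PySem.List.pyGetD_ofNat', PySem.List.pySetD_of_nonneg]
    · by_cases hA : b2 = b1 <;> by_cases hB : b0 = b1 <;>
        cases v0 <;> cases v1 <;> cases v2 <;>
          simp [rowLoopA, rowScanB, p0, pa, pb, pc, pd, pe, ra, rb, rc, rd, re, rf, hA, hB,
            PySem.List.pyGetD_ofNat', PySem.List.pySetD_of_nonneg]
    · by_cases hA : b1 = b2 <;> by_cases hB : b0 = b2 <;>
        cases v0 <;> cases v1 <;> cases v2 <;>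
          simp [rowLoopA, rowScanB, p0, pa, pb, pc, pd, pe, ra, rb, rc, rd, re, rf, hA, hB,
            PySem.List.pyGetD_ofNat', PySem.List.pySetD_of_nonneg]
  · -- 3 ≤ j: no rightward cells below column 3; A descends leftward, B's right range is empty
    have hp : PySem.List.pop? [j] = some (j, ([] : List Int)) := by
      simpa using PySem.List.pop?_last [] j
    have hnil : PySem.List.pyRange (j + 1) 3 1 = [] :=
      PySem.List.pyRange_one_eq_nil (by omega)
    have hcons : PySem.List.pyRange (j - 1) (-1) (-1) =
        (j - 1) :: PySem.List.pyRange (j - 1 - 1) (-1) (-1) :=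
      PySem.List.pyRange_neg_one_cons (by omega)
    have hpnil : PySem.List.pop? ([] : List Int) = none := by decide
    have hjv : j < (v.length : Int) := by have := le_max_left j 2; omega
    have hbk : ¬ (PySem.List.pyGetD b j "" ≠ PySem.List.pyGetD b j "") := by simp
    have hrt : (decide (j < 2) &&
        !(PySem.List.pyGetD (PySem.List.pySetD v j true) (j + 1) false)) = false := by
      simp [show ¬ (j < 2) by omega]
    rw [show j.natAbs + 16 = (j.natAbs + 15) + 1 from rfl, rowLoopA, hp]
    simp only [hbk, if_false]
    rw [hrt]
    simp only [Bool.false_eq_true, if_false]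
    rw [hnil]
    simp only [rowScanB, if_true]
    by_cases hvl : PySem.List.pyGetD (PySem.List.pySetD v j true) (j - 1) false = true
    · rw [show (decide (0 < j) &&
          !(PySem.List.pyGetD (PySem.List.pySetD v j true) (j - 1) false)) = false by
        simp [hvl]]
      rw [show j.natAbs + 15 = (j.natAbs + 14) + 1 from rfl]
      simp [rowLoopA, hpnil, hcons, rowScanB, hvl]
    · have hih := descend b (PySem.List.pyGetD b j "") (j.natAbs + 15) (j - 1)
        (PySem.List.pySetD v j true) (by omega)
        (by rw [PySem.List.length_pySetD]; omega) (by omega)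
        (fun h => absurd h (by omega))
      rw [show (decide (0 < j) &&
          !(PySem.List.pyGetD (PySem.List.pySetD v j true) (j - 1) false)) = true by
        simp [show (0 : Int) < j by omega, hvl]]
      simp only [if_true, List.nil_append]
      rw [hih, hcons, rowScanB]
      simp only [Bool.not_eq_true] at hvl
      rw [hvl]
      by_cases hb2 : PySem.List.pyGetD b (j - 1) "" ≠ PySem.List.pyGetD b j "" <;> simp [hb2]

-- ===== VERDICT (by name: the statement is the Claim_ definition above) =====
theorem check_hor_spec : Claim_equal_check_hor := by
  intro i j board visited _ hpre
  obtain ⟨hib, hiv, hdisj⟩ := hpre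
  unfold Spec_check_hor check_hor check_hor_alt
  have h1 : [(i, j)] = [j].map (fun k => (i, k)) := by simp
  rw [h1, simA board _ i (j.natAbs + 16) [j] visited hiv]
  have hlen0 : PySem.Raise.InRange (pvSet2 visited i j true).length i := by
    rw [length_pvSet2]; exact hiv
  obtain ⟨e1, e2, e3⟩ := simB board (pvGet2D board i j "") i
    (PySem.List.pyRange (j + 1) 3 1) (pvSet2 visited i j true) hlen0
  rw [row_pvSet2 visited i j true hiv] at e1 e2
  obtain ⟨f1, _, _⟩ := simB board (pvGet2D board i j "") i
    (PySem.List.pyRange (j - 1) (-1) (-1))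
    (scanRowB board (pvGet2D board i j "") i (PySem.List.pyRange (j + 1) 3 1)
      (pvSet2 visited i j true)).2 (by rw [e3]; exact hlen0)
  rw [e2] at f1
  simp only [e1, f1]
  rcases hdisj with ⟨hj0, hb3, hv3⟩ | ⟨hj, hjb, hjv, h3b, h3v⟩
  · exact row_main_pos (PySem.List.pyGetD board i []) (PySem.List.pyGetD visited i []) j
      hj0 hb3 hv3
  · exact row_main_neg (PySem.List.pyGetD board i []) (PySem.List.pyGetD visited i []) j
      hj hjb hjv h3b h3v
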